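-- pv_equiv track=rewrite | github.com/dhK98/study_algorithm | programmers/string/신규 아이디 추천.py | solution
-- ===== SOURCE A (Python) =====
-- def solution(new_id):
--     answer = new_id.lower()
--     filterd = []
--     for char in answer:
--         if char.isalpha() or char.isdigit() or char in ["-","_","."]:
--             filterd.append(char)
--     i = 0
--     while i < len(filterd)-1:
--         if filterd[i] == '.' and filterd[i+1] == '.':
--             filterd.pop(i)
--             continue
--         i += 1
--
--     if filterd and filterd[0] == '.':
--         filterd.pop(0)
--     if filterd and filterd[-1] == '.':
--         filterd.pop(-1)
--     if not filterd:
--         filterd.append('a')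
--
--     end_point = 15 if len(filterd) >= 15 else len(filterd)
--     filterd = filterd[0:end_point]
--     if filterd and filterd[-1] == '.':
--         filterd.pop(-1)
--
--     while len(filterd) <= 2:
--         filterd.append(filterd[-1])
--
--     return ''.join(filterd)
-- ===== SOURCE B (Python) =====
-- def solution(new_id):
--     # Single left-to-right pass: filter allowed chars and collapse runs of dots
--     # as they are appended (instead of A's quadratic pop-in-loop), then fix up
--     # the ends with O(1)/O(n) string operations.
--     out = []
--     for ch in new_id.lower():
--         if ch.isalpha() or ch.isdigit() or ch in "-_.":
--             if not (ch == '.' and out and out[-1] == '.'):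
--                 out.append(ch)
--     s = ''.join(out)
--     if s.startswith('.'):
--         s = s[1:]
--     if s.endswith('.'):
--         s = s[:-1]
--     if not s:
--         s = 'a'
--     s = s[:15]
--     if s.endswith('.'):
--         s = s[:-1]
--     if len(s) < 3:
--         s = s + s[-1] * (3 - len(s))
--     return s
-- ===== Notes on version B (the rewrite author's own statement) =====
-- stated objective: faster
-- what changed: Consecutive dots are collapsed in the same single left-to-right filtering pass (skip a '.' when the last kept char is '.') instead of A's quadratic while-loop that repeatedly pops from the middle of the list; the end fix-ups become plain string slices and the pad loop a closed-form repeat.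
import Mathlib
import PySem

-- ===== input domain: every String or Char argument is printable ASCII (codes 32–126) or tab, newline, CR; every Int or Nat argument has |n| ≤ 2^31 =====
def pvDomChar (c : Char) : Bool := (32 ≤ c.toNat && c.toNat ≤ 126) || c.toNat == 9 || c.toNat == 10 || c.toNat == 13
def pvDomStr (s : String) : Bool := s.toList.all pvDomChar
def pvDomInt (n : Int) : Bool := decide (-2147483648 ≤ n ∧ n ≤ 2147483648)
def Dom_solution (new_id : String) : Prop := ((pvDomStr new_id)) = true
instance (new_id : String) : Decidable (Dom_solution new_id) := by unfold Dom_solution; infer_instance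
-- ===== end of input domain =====

-- B replaces A's quadratic pop-in-loop dot collapsing by a single fused filter-and-collapse pass (faster in a timing run); return values proved equal on all inputs.

-- ===== PORT A =====
-- "char.isalpha() or char.isdigit() or char in ['-','_','.']" (shared by both Pythons verbatim)
def pvAllowed (c : Char) : Bool :=
  PySem.Chars.isalpha c || PySem.Chars.isdigit c || (c == '-' || c == '_' || c == '.')

-- A's while loop: "while i < len(filterd)-1: if filterd[i]=='.' and filterd[i+1]=='.': filterd.pop(i); continue; i += 1"
-- (pop(i) on an in-range index is eraseIdx i; the indexing proofs only witness the bounds the loop guard guarantees)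
def pvCollapseLoopA (l : List Char) (i : Nat) : List Char :=
  if h : i < l.length - 1 then
    if l[i]'(by omega) == '.' && l[i+1]'(by omega) == '.' then
      pvCollapseLoopA (l.eraseIdx i) i
    else
      pvCollapseLoopA l (i+1)
  else l
termination_by l.length - i
decreasing_by
  · have hi : i < l.length := by omega
    simp only [List.length_eraseIdx, if_pos hi]; omega
  · omega

-- A's pad loop: "while len(filterd) <= 2: filterd.append(filterd[-1])"; filterd[-1] is pyGet? l (-1)
-- (none = Python IndexError on the empty list; that branch returns l and is never reached by `solution`)
def pvPadLoopA (l : List Char) : List Char :=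
  if _h : l.length ≤ 2 then
    match PySem.List.pyGet? l (-1) with
    | some c => pvPadLoopA (l ++ [c])
    | none => l
  else l
termination_by 3 - l.length
decreasing_by simp; omega

def solution (new_id : String) : String :=
  let answer := PySem.Chars.lower new_id.toList          -- answer = new_id.lower()
  let filterd := answer.foldl (fun acc c => if pvAllowed c then acc ++ [c] else acc) []
  let filterd := pvCollapseLoopA filterd 0
  let filterd := if filterd.head? == some '.' then filterd.eraseIdx 0 else filterd        -- "if filterd and filterd[0]=='.': pop(0)"
  let filterd := if filterd.getLast? == some '.' then filterd.eraseIdx (filterd.length - 1) else filterd  -- pop(-1)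
  let filterd := if filterd.isEmpty then filterd ++ ['a'] else filterd
  let endPoint : Nat := if filterd.length ≥ 15 then 15 else filterd.length
  let filterd := PySem.List.slice filterd (some 0) (some (endPoint : Int))   -- filterd[0:end_point]
  let filterd := if filterd.getLast? == some '.' then filterd.eraseIdx (filterd.length - 1) else filterd  -- pop(-1)
  String.ofList (pvPadLoopA filterd)                     -- ''.join(filterd) of single chars

-- ===== PORT B =====
def solution_alt (new_id : String) : String :=
  -- one pass: filter allowed chars, never appending a '.' right after a kept '.'
  let out := (PySem.Chars.lower new_id.toList).foldl
    (fun acc ch =>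
      if pvAllowed ch then
        if ch == '.' && acc.getLast? == some '.' then acc else acc ++ [ch]
      else acc) []
  let s := out                                            -- s = ''.join(out) (single chars)
  let s := if PySem.Chars.startswith s ['.'] then s.tail else s     -- s[1:]
  let s := if PySem.Chars.endswith s ['.'] then s.dropLast else s   -- s[:-1]
  let s := if s.isEmpty then ['a'] else s
  let s := s.take 15                                      -- s[:15]
  let s := if PySem.Chars.endswith s ['.'] then s.dropLast else s   -- s[:-1]
  let s := if s.length < 3 then
      s ++ (match s.getLast? with
            | some c => List.replicate (3 - s.length) c   -- s[-1] * (3 - len(s)); s[-1] would raise on empty s, unreachable here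
            | none => [])
    else s
  String.ofList s

-- ===== PRECONDITION & SPEC =====
def Spec_solution (new_id : String) (out : String) : Prop := out = solution_alt new_id
instance (new_id : String) (out : String) : Decidable (Spec_solution new_id out) := by unfold Spec_solution; infer_instance

-- ===== CLAIM (what is proved, stated in full; the proofs are below) =====
def Claim_equal_solution : Prop := ∀ (new_id : String), Dom_solution new_id → Spec_solution new_id (solution new_id)

-- ===== LEMMAS AND PROOFS =====

-- collapse of consecutive dots, as a structural recursion (proof-side reference function)
def pvCd : List Char → List Char
  | [] => []
  | [a] => [a]
  | a :: b :: t => if a = '.' ∧ b = '.' then pvCd (b :: t) else a :: pvCd (b :: t)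

-- collapse remembering the previously kept character (shape of B's fold)
def pvCdFrom : Option Char → List Char → List Char
  | _, [] => []
  | p, c :: t => if c = '.' ∧ p = some '.' then pvCdFrom p t else c :: pvCdFrom (some c) t

lemma pvCd_short (l : List Char) (h : l.length ≤ 1) : pvCd l = l := by
  match l with
  | [] => rfl
  | [a] => rfl
  | a :: b :: t => simp at h

lemma pvCollapseLoopA_eq (l : List Char) (i : Nat) :
    pvCollapseLoopA l i = l.take i ++ pvCd (l.drop i) := by
  induction l, i using pvCollapseLoopA.induct with
  | case1 l i h hdot ih =>
    have h1 : i < l.length := by omega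
    have h2 : i + 1 < l.length := by omega
    rw [pvCollapseLoopA, dif_pos h, if_pos hdot, ih]
    have hdots : l[i]'h1 = '.' ∧ l[i+1]'h2 = '.' := by simpa using hdot
    have he : l.eraseIdx i = l.take i ++ l.drop (i+1) := List.eraseIdx_eq_take_drop_succ l i
    have hlen : (l.take i).length = i := by simp; omega
    rw [he, List.take_append, List.drop_append, hlen]
    simp only [Nat.sub_self, List.take_zero, List.append_nil, List.take_take, Nat.min_self,
      List.drop_take, Nat.sub_self, List.drop_zero]
    have : l.take i ++ [] ++ pvCd (l.drop (i+1)) = l.take i ++ pvCd (l.drop (i+1)) := by simp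
    rw [List.drop_eq_getElem_cons h1, List.drop_eq_getElem_cons h2]
    simp [pvCd, hdots.1, hdots.2]
  | case2 l i h hdot ih =>
    have h1 : i < l.length := by omega
    have h2 : i + 1 < l.length := by omega
    rw [pvCollapseLoopA, dif_pos h, if_neg (by simp [hdot]), ih]
    have hne : ¬ (l[i]'h1 = '.' ∧ l[i+1]'h2 = '.') := by
      intro hc; simp [hc.1, hc.2] at hdot
    have ht : List.take (i+1) l = List.take i l ++ [l[i]'h1] := by
      rw [List.take_add_one, List.getElem?_eq_getElem h1]; rfl
    have hcd : pvCd (l[i]'h1 :: l[i+1]'h2 :: List.drop (i+2) l)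
        = l[i]'h1 :: pvCd (l[i+1]'h2 :: List.drop (i+2) l) := by
      simp only [pvCd, if_neg hne]
    rw [List.drop_eq_getElem_cons h1, List.drop_eq_getElem_cons h2, hcd, ht,
      List.append_assoc, List.singleton_append]
  | case3 l i h =>
    rw [pvCollapseLoopA, dif_neg h, pvCd_short _ (by simp; omega), List.take_append_drop]

lemma pvCd_eq_cdFrom (a : Char) (t : List Char) : pvCd (a :: t) = a :: pvCdFrom (some a) t := by
  induction t generalizing a with
  | nil => rfl
  | cons b t ih =>
    by_cases h : a = '.' ∧ b = '.'
    · obtain ⟨ha, hb⟩ := h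
      subst ha; subst hb
      rw [show pvCd ('.' :: '.' :: t) = pvCd ('.' :: t) from by simp [pvCd], ih '.']
      simp [pvCdFrom]
    · simp only [pvCd, pvCdFrom, if_neg h]
      have hne : ¬ (b = '.' ∧ (some a : Option Char) = some '.') := by
        intro ⟨h1, h2⟩; exact h ⟨by simpa using h2, h1⟩
      rw [ih b, if_neg hne]

lemma pvCd_eq_cdFrom_none (m : List Char) : pvCd m = pvCdFrom none m := by
  cases m with
  | nil => rfl
  | cons a t =>
    rw [pvCd_eq_cdFrom]
    have : ¬ (a = '.' ∧ (none : Option Char) = some '.') := by simp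
    simp [pvCdFrom]

lemma pvFoldG_eq (m : List Char) (acc : List Char) :
    m.foldl (fun acc ch => if ch == '.' && acc.getLast? == some '.' then acc else acc ++ [ch]) acc
      = acc ++ pvCdFrom acc.getLast? m := by
  induction m generalizing acc with
  | nil => simp [pvCdFrom]
  | cons c t ih =>
    simp only [List.foldl_cons]
    by_cases h : c = '.' ∧ acc.getLast? = some '.'
    · have hb : (c == '.' && acc.getLast? == some '.') = true := by simp [h.1, h.2]
      simp only [hb, if_true]
      rw [ih acc]
      simp [pvCdFrom, h]
    · have hb : (c == '.' && acc.getLast? == some '.') = false := by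
        rcases not_and_or.mp h with h1 | h1 <;> simp [h1]
      simp only [hb, Bool.false_eq_true, if_false]
      rw [ih (acc ++ [c])]
      simp [pvCdFrom, if_neg h]

lemma pvPadLoopA_eq (l : List Char) :
    pvPadLoopA l = (if l.length < 3 then
      l ++ (match l.getLast? with
            | some c => List.replicate (3 - l.length) c
            | none => []) else l) := by
  match l with
  | [] => simp [pvPadLoopA, PySem.List.pyGet?_neg_one]
  | [a] => simp [pvPadLoopA, PySem.List.pyGet?_neg_one]
  | [a, b] => simp [pvPadLoopA, PySem.List.pyGet?_neg_one]
  | a :: b :: c :: t =>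
    rw [pvPadLoopA]
    have h2 : ¬ (a :: b :: c :: t).length ≤ 2 := by simp
    have h3 : ¬ (a :: b :: c :: t).length < 3 := by simp
    rw [dif_neg h2, if_neg h3]

lemma pvStepHead (k : List Char) :
    (if PySem.Chars.startswith k ['.'] then k.tail else k)
      = (if k.head? == some '.' then k.eraseIdx 0 else k) := by
  have hs : PySem.Chars.startswith k ['.'] = (k.head? == some '.') := by
    cases k <;> simp [PySem.Chars.startswith, List.isPrefixOf, eq_comm]
  rw [hs, List.eraseIdx_zero]

lemma pvStepLast (k : List Char) :
    (if PySem.Chars.endswith k ['.'] then k.dropLast else k)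
      = (if k.getLast? == some '.' then k.eraseIdx (k.length - 1) else k) := by
  have hs : PySem.Chars.endswith k ['.'] = (k.getLast? == some '.') := by
    rw [show k.getLast? = k.reverse.head? from List.head?_reverse.symm]
    simp only [PySem.Chars.endswith, List.isSuffixOf, List.reverse_singleton]
    cases k.reverse <;> simp [List.isPrefixOf, eq_comm]
  rw [hs, List.eraseIdx_length_sub_one]

lemma pvStepEmpty (k : List Char) :
    (if k.isEmpty then k ++ ['a'] else k) = (if k.isEmpty then ['a'] else k) := by
  cases k <;> simp

lemma pvStepTake (k : List Char) :
    PySem.List.slice k (some 0) (some ((if k.length >= 15 then 15 else k.length : Nat) : Int))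
      = k.take 15 := by
  by_cases h : k.length ≥ 15
  · rw [show ((if k.length ≥ 15 then 15 else k.length : Nat) : Int) = ((15 : Nat) : Int) by simp [h]]
    rw [PySem.List.slice_zero_start, PySem.List.slice_to_natCast]
  · rw [show ((if k.length ≥ 15 then 15 else k.length : Nat) : Int) = ((k.length : Nat) : Int) by simp [h]]
    rw [PySem.List.slice_zero_start, PySem.List.slice_to_natCast, List.take_length,
      List.take_of_length_le (by omega : k.length ≤ 15)]

-- ===== VERDICT (by name: the statement is the Claim_ definition above) =====
theorem solution_spec : Claim_equal_solution := by
  intro new_id _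
  unfold Spec_solution solution solution_alt
  simp only [PySem.List.foldl_if_eq_foldl_filter, PySem.List.foldl_append_singleton_eq_self,
    List.nil_append, pvFoldG_eq, List.getLast?_nil, pvCollapseLoopA_eq, List.take_zero,
    List.drop_zero, pvCd_eq_cdFrom_none, pvStepHead, pvStepLast, pvStepEmpty, pvStepTake,
    pvPadLoopA_eq]
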